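-- pv_equiv track=rewrite | github.com/MrBrantCode/unitest_baseline | mut_generate/mist_train_taco/taco_9251/solution.py | calculate_k_dmc_numbers
-- ===== SOURCE A (Python) =====
-- def calculate_k_dmc_numbers(S, k_list):
--     N = len(S)
--     DM_total = [(0, 0, 0)]
--     C_list = []
--
--     # Precompute the DM_total array and C_list
--     for i in range(N):
--         if S[i] == 'D':
--             DM_total.append((DM_total[-1][0] + 1, DM_total[-1][1], DM_total[-1][2]))
--         elif S[i] == 'M':
--             DM_total.append((DM_total[-1][0], DM_total[-1][1] + 1, DM_total[-1][2] + DM_total[-1][0]))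
--         else:
--             DM_total.append(DM_total[-1])
--         if S[i] == 'C':
--             C_list.append(i)
--
--     # Initialize the answer list
--     ans_list = [0] * len(k_list)
--
--     # Calculate the k-DMC numbers
--     for c in C_list:
--         for q in range(len(k_list)):
--             k = k_list[q]
--             if k > c:
--                 ans_list[q] += DM_total[c + 1][2]
--             else:
--                 ans_list[q] += DM_total[c + 1][2] - DM_total[c + 1 - k][2]
--                 ans_list[q] -= DM_total[c + 1 - k][0] * (DM_total[c + 1][1] - DM_total[c + 1 - k][1])
--
--     return ans_list
-- ===== SOURCE B (Python) =====
-- def calculate_k_dmc_numbers(S, k_list):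
--     # Sliding-window alternative: no prefix tables; for each k keep counts of
--     # D's, M's and DM-pairs inside the window of the last k positions.
--     res = []
--     for k in k_list:
--         d = m = dm = ans = 0
--         for i, ch in enumerate(S):
--             j = i - k
--             if 0 <= j < len(S):
--                 left = S[j]
--                 if left == 'D':
--                     d -= 1
--                     dm -= m
--                 elif left == 'M':
--                     m -= 1
--             if ch == 'D':
--                 d += 1
--             elif ch == 'M':
--                 m += 1
--                 dm += d
--             elif ch == 'C':
--                 ans += dm
--         res.append(ans)
--     return res
-- ===== Notes on version B (the rewrite author's own statement) =====
-- stated objective: alternative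
-- what changed: Replaced A's precomputed prefix-sum tables (DM_total triples indexed by c+1-k for every C position x every query) by a per-query sliding window that incrementally maintains the counts of D's, M's and DM-pairs inside the last k positions, accumulating the answer at each C; no prefix arrays or index lookups remain.
-- outside the precondition, e.g. on calculate_k_dmc_numbers('CMD', [-2]): A returns [1], B returns [0]
import Mathlib
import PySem

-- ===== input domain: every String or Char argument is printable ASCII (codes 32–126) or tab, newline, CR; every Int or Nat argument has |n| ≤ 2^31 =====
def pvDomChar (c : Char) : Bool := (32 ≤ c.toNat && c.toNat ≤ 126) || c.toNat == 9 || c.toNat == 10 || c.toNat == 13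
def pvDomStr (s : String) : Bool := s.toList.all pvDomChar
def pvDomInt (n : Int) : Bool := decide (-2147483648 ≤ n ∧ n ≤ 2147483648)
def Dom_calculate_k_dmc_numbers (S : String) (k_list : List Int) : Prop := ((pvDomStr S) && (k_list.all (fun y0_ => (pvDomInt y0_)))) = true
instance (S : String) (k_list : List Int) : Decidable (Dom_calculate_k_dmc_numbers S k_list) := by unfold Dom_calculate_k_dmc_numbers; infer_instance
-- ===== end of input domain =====

-- B replaces A's prefix-sum tables by a per-query sliding window maintaining D/M/DM-pair
-- counts over the last k positions (alternative algorithm, same exact results on Pre_).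


-- ===== PORT A =====
def calculate_k_dmc_numbers (S : String) (k_list : List Int) : List Int :=
  let N : Int := PySem.Str.len S
  let built := (PySem.List.pyRange 0 N 1).foldl
    (fun (st : List (Int × Int × Int) × List Int) i =>
      let DM := st.1
      let Cl := st.2
      let last := (PySem.List.pyGet? DM (-1)).getD (0, 0, 0)   -- DM_total[-1] (list never empty)
      let ch := (PySem.Str.pyGet? S i).getD ' '                -- S[i], i ∈ range(N) is in range
      let DM' := if ch = 'D' then DM ++ [(last.1 + 1, last.2.1, last.2.2)]
                 else if ch = 'M' then DM ++ [(last.1, last.2.1 + 1, last.2.2 + last.1)]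
                 else DM ++ [last]
      let Cl' := if ch = 'C' then Cl ++ [i] else Cl
      (DM', Cl'))
    ([(0, 0, 0)], [])
  let DM_total := built.1
  let C_list := built.2
  let ans0 : List Int := List.replicate k_list.length 0        -- [0] * len(k_list)
  C_list.foldl (fun ans c =>
    (PySem.List.pyRange 0 (k_list.length : Int) 1).foldl (fun ans q =>
      let k := PySem.List.pyGetD k_list q 0
      if k > c then
        let t1 := PySem.List.pyGetD DM_total (c + 1) (0, 0, 0)
        PySem.List.pySetD ans q (PySem.List.pyGetD ans q 0 + t1.2.2)
      else
        let t1 := PySem.List.pyGetD DM_total (c + 1) (0, 0, 0)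
        let t0 := PySem.List.pyGetD DM_total (c + 1 - k) (0, 0, 0)
        let ans1 := PySem.List.pySetD ans q (PySem.List.pyGetD ans q 0 + (t1.2.2 - t0.2.2))
        PySem.List.pySetD ans1 q (PySem.List.pyGetD ans1 q 0 - t0.1 * (t1.2.1 - t0.2.1)))
      ans) ans0

-- ===== PORT B =====
def calculate_k_dmc_numbers_alt (S : String) (k_list : List Int) : List Int :=
  k_list.map (fun k =>
    ((PySem.List.enumerate S.toList 0).foldl
      (fun (st : Int × Int × Int × Int) p =>
        let j := p.1 - k
        let st1 : Int × Int × Int × Int :=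
          if 0 ≤ j ∧ j < (S.toList.length : Int) then
            let left := (PySem.Str.pyGet? S j).getD ' '
            if left = 'D' then (st.1 - 1, st.2.1, st.2.2.1 - st.2.1, st.2.2.2)
            else if left = 'M' then (st.1, st.2.1 - 1, st.2.2.1, st.2.2.2)
            else st
          else st
        if p.2 = 'D' then (st1.1 + 1, st1.2.1, st1.2.2.1, st1.2.2.2)
        else if p.2 = 'M' then (st1.1, st1.2.1 + 1, st1.2.2.1 + st1.1, st1.2.2.2)
        else if p.2 = 'C' then (st1.1, st1.2.1, st1.2.2.1, st1.2.2.2 + st1.2.2.1)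
        else st1)
      (0, 0, 0, 0)).2.2.2)

-- ===== PRECONDITION & SPEC =====
-- Pre_ restricts each query k to the natural domain 0 ≤ k (k is a span length) whenever S
-- contains a 'C': for negative k with a 'C' present, A either raises IndexError
-- (DM_total[c+1-k] past the end) or returns a meaningless total read from prefix sums
-- beyond position c.
def Pre_calculate_k_dmc_numbers (S : String) (k_list : List Int) : Prop :=
  ∀ k ∈ k_list, 0 ≤ k ∨ 'C' ∉ S.toList
instance (S : String) (k_list : List Int) : Decidable (Pre_calculate_k_dmc_numbers S k_list) := by
  unfold Pre_calculate_k_dmc_numbers; infer_instance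

def pvWitness_calculate_k_dmc_numbers : String × List Int := ("DMCDMC", [2, 0, 6])

def Spec_calculate_k_dmc_numbers (S : String) (k_list : List Int) (out : List Int) : Prop := out = calculate_k_dmc_numbers_alt S k_list
instance (S : String) (k_list : List Int) (out : List Int) : Decidable (Spec_calculate_k_dmc_numbers S k_list out) := by unfold Spec_calculate_k_dmc_numbers; infer_instance

-- ===== CLAIM (what is proved, stated in full; the proofs are below) =====
def Claim_equal_calculate_k_dmc_numbers : Prop := ∀ (S : String) (k_list : List Int), Dom_calculate_k_dmc_numbers S k_list → Pre_calculate_k_dmc_numbers S k_list → Spec_calculate_k_dmc_numbers S k_list (calculate_k_dmc_numbers S k_list)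

-- ===== LEMMAS AND PROOFS =====

def pvStep (ch : Char) (t : Int × Int × Int) : Int × Int × Int :=
  if ch = 'D' then (t.1 + 1, t.2.1, t.2.2)
  else if ch = 'M' then (t.1, t.2.1 + 1, t.2.2 + t.1)
  else t

def pvPre (s : List Char) (n : Nat) : Int × Int × Int :=
  (s.take n).foldl (fun t ch => pvStep ch t) (0, 0, 0)

def pvF (s : List Char) (n l : Nat) : Int :=
  (pvPre s n).2.2 - (pvPre s l).2.2 - (pvPre s l).1 * ((pvPre s n).2.1 - (pvPre s l).2.1)

def pvTerm (s : List Char) (k : Int) (c : Nat) : Int :=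
  if k > (c : Int) then (pvPre s (c + 1)).2.2 else pvF s (c + 1) (c + 1 - k.toNat)

def pvCpos (s : List Char) : List Nat :=
  (List.range s.length).filter (fun c => s.getD c ' ' = 'C')

def pvSum (s : List Char) (k : Int) : Int := ((pvCpos s).map (pvTerm s k)).sum

def pvTermA (DM : List (Int × Int × Int)) (c k : Int) : Int :=
  if k > c then (PySem.List.pyGetD DM (c + 1) (0, 0, 0)).2.2
  else (PySem.List.pyGetD DM (c + 1) (0, 0, 0)).2.2 - (PySem.List.pyGetD DM (c + 1 - k) (0, 0, 0)).2.2
       - (PySem.List.pyGetD DM (c + 1 - k) (0, 0, 0)).1 *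
         ((PySem.List.pyGetD DM (c + 1) (0, 0, 0)).2.1 - (PySem.List.pyGetD DM (c + 1 - k) (0, 0, 0)).2.1)

def pvBuildStep (S : String) (st : List (Int × Int × Int) × List Int) (i : Int) :
    List (Int × Int × Int) × List Int :=
  let DM := st.1
  let Cl := st.2
  let last := (PySem.List.pyGet? DM (-1)).getD (0, 0, 0)
  let ch := (PySem.Str.pyGet? S i).getD ' '
  let DM' := if ch = 'D' then DM ++ [(last.1 + 1, last.2.1, last.2.2)]
             else if ch = 'M' then DM ++ [(last.1, last.2.1 + 1, last.2.2 + last.1)]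
             else DM ++ [last]
  let Cl' := if ch = 'C' then Cl ++ [i] else Cl
  (DM', Cl')

def pvInnerStep (kl : List Int) (DM : List (Int × Int × Int)) (c : Int)
    (ans : List Int) (q : Int) : List Int :=
  let k := PySem.List.pyGetD kl q 0
  if k > c then
    let t1 := PySem.List.pyGetD DM (c + 1) (0, 0, 0)
    PySem.List.pySetD ans q (PySem.List.pyGetD ans q 0 + t1.2.2)
  else
    let t1 := PySem.List.pyGetD DM (c + 1) (0, 0, 0)
    let t0 := PySem.List.pyGetD DM (c + 1 - k) (0, 0, 0)
    let ans1 := PySem.List.pySetD ans q (PySem.List.pyGetD ans q 0 + (t1.2.2 - t0.2.2))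
    PySem.List.pySetD ans1 q (PySem.List.pyGetD ans1 q 0 - t0.1 * (t1.2.1 - t0.2.1))

def pvBStep (S : String) (k : Int) (st : Int × Int × Int × Int) (p : Int × Char) :
    Int × Int × Int × Int :=
  let j := p.1 - k
  let st1 : Int × Int × Int × Int :=
    if 0 ≤ j ∧ j < (S.toList.length : Int) then
      let left := (PySem.Str.pyGet? S j).getD ' '
      if left = 'D' then (st.1 - 1, st.2.1, st.2.2.1 - st.2.1, st.2.2.2)
      else if left = 'M' then (st.1, st.2.1 - 1, st.2.2.1, st.2.2.2)
      else st
    else st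
  if p.2 = 'D' then (st1.1 + 1, st1.2.1, st1.2.2.1, st1.2.2.2)
  else if p.2 = 'M' then (st1.1, st1.2.1 + 1, st1.2.2.1 + st1.1, st1.2.2.2)
  else if p.2 = 'C' then (st1.1, st1.2.1, st1.2.2.1, st1.2.2.2 + st1.2.2.1)
  else st1

theorem portA_unfold (S : String) (kl : List Int) :
    calculate_k_dmc_numbers S kl =
      ((PySem.List.pyRange 0 (PySem.Str.len S) 1).foldl (pvBuildStep S) ([(0, 0, 0)], [])).2.foldl
        (fun ans c => (PySem.List.pyRange 0 (kl.length : Int) 1).foldl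
          (pvInnerStep kl ((PySem.List.pyRange 0 (PySem.Str.len S) 1).foldl (pvBuildStep S) ([(0, 0, 0)], [])).1 c) ans)
        (List.replicate kl.length 0) := rfl

theorem portB_unfold (S : String) (kl : List Int) :
    calculate_k_dmc_numbers_alt S kl =
      kl.map (fun k => ((PySem.List.enumerate S.toList 0).foldl (pvBStep S k) (0, 0, 0, 0)).2.2.2) := rfl

theorem pvPre_succ (s : List Char) (n : Nat) (h : n < s.length) :
    pvPre s (n + 1) = pvStep (s.getD n ' ') (pvPre s n) := by
  unfold pvPre
  have h1 : s.take (n+1) = s.take n ++ [s[n]] := by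
    rw [List.take_add_one]; simp [List.getElem?_eq_getElem h]
  rw [h1, List.foldl_append, List.getD_eq_getElem?_getD, List.getElem?_eq_getElem h]
  rfl

theorem pvBuild (S : String) : ∀ n, n ≤ S.toList.length →
    (PySem.List.pyRange 0 (n : Int) 1).foldl (pvBuildStep S) ([(0, 0, 0)], []) =
      ((List.range (n + 1)).map (pvPre S.toList),
       ((List.range n).filter (fun c => S.toList.getD c ' ' = 'C')).map (fun c : Nat => (c : Int))) := by
  intro n hn
  induction n with
  | zero => simp [PySem.List.pyRange_one_eq_nil, pvPre]
  | succ n ih =>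
    have hlt : n < S.toList.length := hn
    rw [show ((n + 1 : Nat) : Int) = (n : Int) + 1 by push_cast; ring,
        PySem.List.pyRange_one_succ_right (by positivity), List.foldl_append,
        ih (le_of_lt hlt)]
    have hch : (PySem.Str.pyGet? S (n : Int)).getD ' ' = S.toList.getD n ' ' := by
      simp [List.getD_eq_getElem?_getD]
    have hlast : (PySem.List.pyGet? ((List.range (n + 1)).map (pvPre S.toList)) (-1)).getD (0,0,0)
        = pvPre S.toList n := by
      rw [PySem.List.pyGet?_neg_one, List.range_succ, List.map_append]
      simp
    have hstep : pvPre S.toList (n+1) = pvStep (S.toList.getD n ' ') (pvPre S.toList n) :=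
      pvPre_succ _ _ hlt
    simp only [pvBuildStep, List.foldl_cons, List.foldl_nil, hch, hlast]
    rw [List.range_succ (n := n + 1), List.map_append, List.range_succ (n := n), List.filter_append]
    refine Prod.ext ?_ ?_
    · show _ = _ ++ List.map (pvPre S.toList) [n + 1]
      rw [List.map_singleton, hstep]
      unfold pvStep
      split_ifs <;> simp
    · show (if S.toList.getD n ' ' = 'C' then _ ++ [(n : Int)] else _) = _
      by_cases hC : S.toList.getD n ' ' = 'C'
      · rw [if_pos hC]
        have : List.filter (fun c => decide (S.toList.getD c ' ' = 'C')) [n] = [n] := by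
          simp [← List.getD_eq_getElem?_getD, hC]
        rw [this]; simp
      · rw [if_neg hC]
        have : List.filter (fun c => decide (S.toList.getD c ' ' = 'C')) [n] = [] := by
          simp [← List.getD_eq_getElem?_getD, hC]
        rw [this]; simp

theorem pvInnerLoop (kl : List Int) (DM : List (Int × Int × Int)) (c : Int) :
    ∀ (suf pre done cur : List Int), kl = pre ++ suf → done.length = pre.length →
      cur.length = suf.length →
      (PySem.List.pyRange (done.length : Int) (kl.length : Int) 1).foldl
        (pvInnerStep kl DM c) (done ++ cur)
        = done ++ (suf.zip cur).map (fun p => p.2 + pvTermA DM c p.1) := by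
  intro suf
  induction suf with
  | nil =>
    intro pre done cur hkl hd hc
    rw [List.length_eq_zero_iff.mp hc,
        PySem.List.pyRange_one_eq_nil (by simp [hkl, hd])]
    simp
  | cons k suf' ih =>
    intro pre done cur hkl hd hc
    cases cur with
    | nil => simp at hc
    | cons a cur' =>
      have hlen : (done.length : Int) < (kl.length : Int) := by
        rw [hkl]; simp [hd]
      rw [PySem.List.pyRange_one_cons hlen, List.foldl_cons]
      have hk : PySem.List.pyGetD kl (done.length : Int) 0 = k := by
        rw [hkl, hd, PySem.List.pyGetD_natCast]
        simp [List.getD_eq_getElem?_getD]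
      have hread : ∀ x : Int, PySem.List.pyGetD (done ++ x :: cur') (done.length : Int) 0 = x := by
        intro x
        rw [PySem.List.pyGetD_natCast]; simp [List.getD_eq_getElem?_getD]
      have hset : ∀ x v : Int, (done ++ x :: cur').set done.length v = done ++ v :: cur' := by
        intro x v; rw [List.set_append]; simp
      have hstep : pvInnerStep kl DM c (done ++ a :: cur') (done.length : Int)
          = done ++ (a + pvTermA DM c k) :: cur' := by
        simp only [pvInnerStep, pvTermA]
        rw [hk, hread]
        by_cases hkc : k > c
        · rw [if_pos hkc, if_pos hkc, PySem.List.pySetD_natCast, hset]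
        · rw [if_neg hkc, if_neg hkc,
              PySem.List.pySetD_natCast (done ++ a :: cur'), hset, hread,
              PySem.List.pySetD_natCast, hset]
          simp only [List.append_cancel_left_eq, List.cons.injEq]
          exact ⟨by ring, trivial⟩
      rw [hstep]
      have hrec := ih (pre ++ [k]) (done ++ [a + pvTermA DM c k]) cur'
        (by rw [hkl, List.append_assoc]; rfl)
        (by simp [hd]) (by simpa using hc)
      have hcast : ((done ++ [a + pvTermA DM c k]).length : Int) = (done.length : Int) + 1 := by
        simp
      rw [hcast] at hrec
      rw [show done ++ (a + pvTermA DM c k) :: cur' = (done ++ [a + pvTermA DM c k]) ++ cur' by simp]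
      rw [hrec]
      simp

theorem pvInnerLoop_full (kl : List Int) (DM : List (Int × Int × Int)) (c : Int) (g : Int → Int) :
    (PySem.List.pyRange 0 (kl.length : Int) 1).foldl (pvInnerStep kl DM c) (kl.map g)
      = kl.map (fun k => g k + pvTermA DM c k) := by
  have h := pvInnerLoop kl DM c kl [] [] (kl.map g) rfl rfl (by simp)
  simp only [List.nil_append, List.length_nil, Nat.cast_zero] at h
  rw [h, show kl.zip (kl.map g) = (kl.map id).zip (kl.map g) by simp, List.zip_map',
      List.map_map]
  simp

theorem pvOuterLoop (kl : List Int) (DM : List (Int × Int × Int)) :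
    ∀ (cl : List Int) (g : Int → Int),
      cl.foldl (fun ans c => (PySem.List.pyRange 0 (kl.length : Int) 1).foldl (pvInnerStep kl DM c) ans) (kl.map g)
        = kl.map (fun k => g k + (cl.map (fun c => pvTermA DM c k)).sum) := by
  intro cl
  induction cl with
  | nil => intro g; simp
  | cons c cl' ih =>
    intro g
    rw [List.foldl_cons, pvInnerLoop_full, ih (fun k => g k + pvTermA DM c k)]
    apply List.map_congr_left
    intro k _
    simp
    ring

theorem portA_char (S : String) (kl : List Int) :
    calculate_k_dmc_numbers S kl
      = kl.map (fun k => ((pvCpos S.toList).map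
          (fun (cn : Nat) => pvTermA ((List.range (S.toList.length + 1)).map (pvPre S.toList)) (cn : Int) k)).sum) := by
  rw [portA_unfold, PySem.Str.len_eq, pvBuild S S.toList.length le_rfl]
  have hrep : (List.replicate kl.length (0 : Int)) = kl.map (fun _ => 0) := by
    simp [List.map_const']
  rw [hrep]
  rw [pvOuterLoop kl _ (((List.range S.toList.length).filter (fun c => S.toList.getD c ' ' = 'C')).map (fun c : Nat => (c : Int))) (fun _ => 0)]
  apply List.map_congr_left
  intro k _
  rw [List.map_map]
  simp only [zero_add]
  unfold pvCpos
  rfl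

theorem pvTermA_eq (S : String) (k : Int) (cn : Nat) (hc : cn < S.toList.length) (hk : 0 ≤ k) :
    pvTermA ((List.range (S.toList.length + 1)).map (pvPre S.toList)) (cn : Int) k
      = pvTerm S.toList k cn := by
  unfold pvTermA pvTerm pvF
  have h1 : PySem.List.pyGetD ((List.range (S.toList.length + 1)).map (pvPre S.toList)) ((cn : Int) + 1) (0,0,0) = pvPre S.toList (cn+1) := by
    rw [show ((cn : Int) + 1) = ((cn + 1 : Nat) : Int) by push_cast; ring,
        PySem.List.pyGetD_natCast, PySem.List.getD_map_range _ _ _ _ (by omega)]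
  by_cases hkc : k > (cn : Int)
  · rw [if_pos hkc, if_pos hkc, h1]
  · rw [if_neg hkc, if_neg hkc, h1]
    have h2 : PySem.List.pyGetD ((List.range (S.toList.length + 1)).map (pvPre S.toList)) ((cn : Int) + 1 - k) (0,0,0) = pvPre S.toList (cn+1-k.toNat) := by
      rw [show ((cn : Int) + 1 - k) = ((cn + 1 - k.toNat : Nat) : Int) by omega,
          PySem.List.pyGetD_natCast, PySem.List.getD_map_range _ _ _ _ (by omega)]
    rw [h2]

theorem pvCpos_nil (s : List Char) (h : 'C' ∉ s) : pvCpos s = [] := by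
  unfold pvCpos
  rw [List.filter_eq_nil_iff]
  intro c hc
  simp only [List.mem_range] at hc
  simp only [decide_eq_true_eq]
  intro hEq
  have hg : s[c] = 'C' := by
    rw [List.getD_eq_getElem?_getD, List.getElem?_eq_getElem hc] at hEq
    simpa using hEq
  exact h (hg ▸ List.getElem_mem hc)

theorem portA_sum (S : String) (kl : List Int) (hpre : ∀ k ∈ kl, 0 ≤ k ∨ 'C' ∉ S.toList) :
    calculate_k_dmc_numbers S kl = kl.map (fun k => pvSum S.toList k) := by
  rw [portA_char]
  apply List.map_congr_left
  intro k hk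
  rcases hpre k hk with h0 | hnc
  · unfold pvSum
    apply congrArg
    apply List.map_congr_left
    intro cn hcn
    have : cn < S.toList.length := by
      have := List.mem_filter.mp hcn
      simpa using this.1
    exact pvTermA_eq S k cn this h0
  · rw [pvCpos_nil _ hnc]
    simp [pvSum, pvCpos_nil _ hnc]

theorem pvPre_zero (s : List Char) : pvPre s 0 = (0, 0, 0) := rfl

theorem pvBStep_keep_ans (S : String) (k : Int) :
    ∀ (l : List (Int × Char)) (st : Int × Int × Int × Int), (∀ p ∈ l, p.2 ≠ 'C') →
      (l.foldl (pvBStep S k) st).2.2.2 = st.2.2.2 := by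
  intro l
  induction l with
  | nil => intro st _; rfl
  | cons p l' ih =>
    intro st h
    rw [List.foldl_cons, ih _ (fun q hq => h q (List.mem_cons_of_mem _ hq))]
    have hp := h p List.mem_cons_self
    obtain ⟨d, m, dm, ans⟩ := st
    simp only [pvBStep]
    split_ifs <;> simp_all

theorem pvSum_noC (S : String) (k : Int) (h : 'C' ∉ S.toList) :
    ((PySem.List.enumerate S.toList 0).foldl (pvBStep S k) (0, 0, 0, 0)).2.2.2
      = pvSum S.toList k := by
  rw [pvBStep_keep_ans S k _ _ ?_, pvSum, pvCpos_nil _ h]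
  · rfl
  · intro p hp
    rw [PySem.List.mem_enumerate_iff] at hp
    obtain ⟨i, hi, rfl⟩ := hp
    intro hc
    exact h (hc ▸ List.getElem_mem hi)

set_option maxHeartbeats 2000000 in
theorem pvBInv (S : String) (k : Int) (hk : 0 ≤ k) :
    ∀ n, n ≤ S.toList.length →
    (PySem.List.enumerate (S.toList.take n) 0).foldl (pvBStep S k) (0, 0, 0, 0) =
      ((pvPre S.toList n).1 - (pvPre S.toList (n - k.toNat)).1,
       (pvPre S.toList n).2.1 - (pvPre S.toList (n - k.toNat)).2.1,
       pvF S.toList n (n - k.toNat),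
       (((List.range n).filter (fun c => S.toList.getD c ' ' = 'C')).map (pvTerm S.toList k)).sum) := by
  intro n hn
  induction n with
  | zero =>
    simp [pvPre_zero, pvF]
  | succ n ih =>
    have hlt : n < S.toList.length := hn
    have htake : S.toList.take (n+1) = S.toList.take n ++ [S.toList[n]] := by
      rw [List.take_add_one]; simp [List.getElem?_eq_getElem hlt]
    have hlen : (S.toList.take n).length = n := by rw [List.length_take]; omega
    rw [htake, PySem.List.enumerate_append, List.foldl_append, ih (le_of_lt hlt), hlen]
    have hench : PySem.List.enumerate [S.toList[n]] ((0 : Int) + (n : Int)) = [((n : Int), S.toList[n])] := by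
      simp [PySem.List.enumerate_cons]
    rw [hench, List.foldl_cons, List.foldl_nil]
    have hgd : S.toList.getD n ' ' = S.toList[n] := by
      rw [List.getD_eq_getElem?_getD, List.getElem?_eq_getElem hlt]; rfl
    have hsn : pvPre S.toList (n+1) = pvStep (S.toList.getD n ' ') (pvPre S.toList n) :=
      pvPre_succ _ _ hlt
    have hsum : (((List.range (n+1)).filter (fun c => S.toList.getD c ' ' = 'C')).map (pvTerm S.toList k)).sum
        = (((List.range n).filter (fun c => S.toList.getD c ' ' = 'C')).map (pvTerm S.toList k)).sum
          + (if S.toList.getD n ' ' = 'C' then pvTerm S.toList k n else 0) := by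
      rw [List.range_succ, List.filter_append, List.map_append, List.sum_append]
      by_cases hC : S.toList.getD n ' ' = 'C'
      · rw [if_pos hC]
        have h1 : List.filter (fun c => decide (S.toList.getD c ' ' = 'C')) [n] = [n] := by
          simp [← List.getD_eq_getElem?_getD, hC]
        rw [h1]; simp
      · rw [if_neg hC]
        have h1 : List.filter (fun c => decide (S.toList.getD c ' ' = 'C')) [n] = [] := by
          simp [← List.getD_eq_getElem?_getD, hC]
        rw [h1]; simp
    by_cases hkn : k.toNat ≤ n
    · -- removal fires
      have hcond : (0 ≤ (n : Int) - k ∧ (n : Int) - k < (S.toList.length : Int)) := by omega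
      have hj : (n : Int) - k = ((n - k.toNat : Nat) : Int) := by omega
      have hll : n - k.toNat < S.toList.length := by omega
      have hleft : (PySem.Str.pyGet? S ((n : Int) - k)).getD ' ' = S.toList.getD (n - k.toNat) ' ' := by
        rw [hj, PySem.Str.pyGet?_natCast, List.getD_eq_getElem?_getD]
      have hL1 : n + 1 - k.toNat = (n - k.toNat) + 1 := by omega
      have hsl : pvPre S.toList ((n - k.toNat) + 1)
          = pvStep (S.toList.getD (n - k.toNat) ' ') (pvPre S.toList (n - k.toNat)) :=
        pvPre_succ _ _ hll
      have hterm : pvTerm S.toList k n = pvF S.toList (n+1) ((n - k.toNat) + 1) := by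
        rw [pvTerm, if_neg (by omega), hL1]
      simp only [pvBStep, if_pos hcond, hleft, hsum, hL1, hsn, hsl, hterm]
      have hcl : S.toList.getD (n - k.toNat) ' ' = 'D' ∨ S.toList.getD (n - k.toNat) ' ' = 'M' ∨
          (S.toList.getD (n - k.toNat) ' ' ≠ 'D' ∧ S.toList.getD (n - k.toNat) ' ' ≠ 'M') := by tauto
      have hcn : S.toList.getD n ' ' = 'D' ∨ S.toList.getD n ' ' = 'M' ∨ S.toList.getD n ' ' = 'C' ∨
          (S.toList.getD n ' ' ≠ 'D' ∧ S.toList.getD n ' ' ≠ 'M' ∧ S.toList.getD n ' ' ≠ 'C') := by tauto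
      rcases hcl with hA | hA | ⟨hA, hA'⟩
      · rcases hcn with hB | hB | hB | ⟨hB, hB', hB''⟩
        · simp only [List.getD_eq_getElem?_getD] at hA hB
          simp [pvStep, pvF, hgd.symm, hA, hB, Prod.ext_iff] <;>
            (and_intros <;> (try trivial) <;> (try (simp only [hsn, hsl]; simp [pvStep, hA, hB])) <;> (try ring))
        · simp only [List.getD_eq_getElem?_getD] at hA hB
          simp [pvStep, pvF, hgd.symm, hA, hB, Prod.ext_iff] <;>
            (and_intros <;> (try trivial) <;> (try (simp only [hsn, hsl]; simp [pvStep, hA, hB])) <;> (try ring))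
        · simp only [List.getD_eq_getElem?_getD] at hA hB
          simp [pvStep, pvF, hgd.symm, hA, hB, Prod.ext_iff] <;>
            (and_intros <;> (try trivial) <;> (try (simp only [hsn, hsl]; simp [pvStep, hA, hB])) <;> (try ring))
        · simp only [List.getD_eq_getElem?_getD] at hA hB hB' hB''
          simp [pvStep, pvF, hgd.symm, hA, hB, hB', hB'', Prod.ext_iff] <;>
            (and_intros <;> (try trivial) <;> (try (simp only [hsn, hsl]; simp [pvStep, hA, hB, hB', hB''])) <;> (try ring))
      · rcases hcn with hB | hB | hB | ⟨hB, hB', hB''⟩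
        · simp only [List.getD_eq_getElem?_getD] at hA hB
          simp [pvStep, pvF, hgd.symm, hA, hB, Prod.ext_iff] <;>
            (and_intros <;> (try trivial) <;> (try (simp only [hsn, hsl]; simp [pvStep, hA, hB])) <;> (try ring))
        · simp only [List.getD_eq_getElem?_getD] at hA hB
          simp [pvStep, pvF, hgd.symm, hA, hB, Prod.ext_iff] <;>
            (and_intros <;> (try trivial) <;> (try (simp only [hsn, hsl]; simp [pvStep, hA, hB])) <;> (try ring))
        · simp only [List.getD_eq_getElem?_getD] at hA hB
          simp [pvStep, pvF, hgd.symm, hA, hB, Prod.ext_iff] <;>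
            (and_intros <;> (try trivial) <;> (try (simp only [hsn, hsl]; simp [pvStep, hA, hB])) <;> (try ring))
        · simp only [List.getD_eq_getElem?_getD] at hA hB hB' hB''
          simp [pvStep, pvF, hgd.symm, hA, hB, hB', hB'', Prod.ext_iff] <;>
            (and_intros <;> (try trivial) <;> (try (simp only [hsn, hsl]; simp [pvStep, hA, hB, hB', hB''])) <;> (try ring))
      · rcases hcn with hB | hB | hB | ⟨hB, hB', hB''⟩
        · simp only [List.getD_eq_getElem?_getD] at hA hA' hB
          simp [pvStep, pvF, hgd.symm, hA, hA', hB, Prod.ext_iff] <;>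
            (and_intros <;> (try trivial) <;> (try (simp only [hsn, hsl]; simp [pvStep, hA, hA', hB])) <;> (try ring))
        · simp only [List.getD_eq_getElem?_getD] at hA hA' hB
          simp [pvStep, pvF, hgd.symm, hA, hA', hB, Prod.ext_iff] <;>
            (and_intros <;> (try trivial) <;> (try (simp only [hsn, hsl]; simp [pvStep, hA, hA', hB])) <;> (try ring))
        · simp only [List.getD_eq_getElem?_getD] at hA hA' hB
          simp [pvStep, pvF, hgd.symm, hA, hA', hB, Prod.ext_iff] <;>
            (and_intros <;> (try trivial) <;> (try (simp only [hsn, hsl]; simp [pvStep, hA, hA', hB])) <;> (try ring))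
        · simp only [List.getD_eq_getElem?_getD] at hA hA' hB hB' hB''
          simp [pvStep, pvF, hgd.symm, hA, hA', hB, hB', hB'', Prod.ext_iff] <;>
            (and_intros <;> (try trivial) <;> (try (simp only [hsn, hsl]; simp [pvStep, hA, hA', hB, hB', hB''])) <;> (try ring))
    · -- window still grows from position 0
      have hcond : ¬ (0 ≤ (n : Int) - k ∧ (n : Int) - k < (S.toList.length : Int)) := by omega
      have h0 : n - k.toNat = 0 := by omega
      have h01 : n + 1 - k.toNat = 0 := by omega
      have hterm : pvTerm S.toList k n = (pvPre S.toList (n+1)).2.2 := by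
        rw [pvTerm, if_pos (by omega)]
      simp only [pvBStep, if_neg hcond, hsum, h0, h01, hsn, hterm, pvPre_zero]
      rcases show S.toList.getD n ' ' = 'D' ∨ S.toList.getD n ' ' = 'M' ∨ S.toList.getD n ' ' = 'C' ∨
          (S.toList.getD n ' ' ≠ 'D' ∧ S.toList.getD n ' ' ≠ 'M' ∧ S.toList.getD n ' ' ≠ 'C') from by tauto
        with hB | hB | hB | ⟨hB, hB', hB''⟩
      · simp only [List.getD_eq_getElem?_getD] at hB
        simp [pvStep, pvF, hgd.symm, hB, pvPre_zero, Prod.ext_iff] <;>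
          (and_intros <;> (try trivial) <;> (try (simp only [hsn]; simp [pvStep, hB, pvPre_zero])) <;> (try ring))
      · simp only [List.getD_eq_getElem?_getD] at hB
        simp [pvStep, pvF, hgd.symm, hB, pvPre_zero, Prod.ext_iff] <;>
          (and_intros <;> (try trivial) <;> (try (simp only [hsn]; simp [pvStep, hB, pvPre_zero])) <;> (try ring))
      · simp only [List.getD_eq_getElem?_getD] at hB
        simp [pvStep, pvF, hgd.symm, hB, pvPre_zero, Prod.ext_iff] <;>
          (and_intros <;> (try trivial) <;> (try (simp only [hsn]; simp [pvStep, hB, pvPre_zero])) <;> (try ring))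
      · simp only [List.getD_eq_getElem?_getD] at hB hB' hB''
        simp [pvStep, pvF, hgd.symm, hB, hB', hB'', pvPre_zero, Prod.ext_iff] <;>
          (and_intros <;> (try trivial) <;> (try (simp only [hsn]; simp [pvStep, hB, hB', hB'', pvPre_zero])) <;> (try ring))

theorem portB_sum (S : String) (k : Int) (hk : 0 ≤ k) :
    ((PySem.List.enumerate S.toList 0).foldl (pvBStep S k) (0, 0, 0, 0)).2.2.2
      = pvSum S.toList k := by
  have h := pvBInv S k hk S.toList.length le_rfl
  rw [List.take_length] at h
  rw [h, pvSum, pvCpos]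

theorem pvMain (S : String) (kl : List Int) (hpre : ∀ k ∈ kl, 0 ≤ k ∨ 'C' ∉ S.toList) :
    calculate_k_dmc_numbers S kl = calculate_k_dmc_numbers_alt S kl := by
  rw [portA_sum S kl hpre, portB_unfold]
  apply List.map_congr_left
  intro k hk
  rcases hpre k hk with h0 | hnc
  · exact (portB_sum S k h0).symm
  · exact (pvSum_noC S k hnc).symm

theorem pvWitness_ok :
    Dom_calculate_k_dmc_numbers pvWitness_calculate_k_dmc_numbers.1 pvWitness_calculate_k_dmc_numbers.2 ∧
    Pre_calculate_k_dmc_numbers pvWitness_calculate_k_dmc_numbers.1 pvWitness_calculate_k_dmc_numbers.2 := by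
  constructor
  · decide
  · intro k hk
    left
    fin_cases hk <;> decide


-- ===== VERDICT (by name: the statement is the Claim_ definition above) =====
theorem calculate_k_dmc_numbers_spec : Claim_equal_calculate_k_dmc_numbers := by
  intro S kl _ hpre
  unfold Spec_calculate_k_dmc_numbers
  exact pvMain S kl hpre
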